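-- pv_equiv track=rewrite | github.com/AlifSrSE/ProblemSolves | 1996E-decode.py | solve
-- ===== SOURCE A (Python) =====
-- MODULUS = 10**9 + 7
--
-- def solve(s):
--     diff_to_left_sum = {0: 1}
--     result = 0
--     diff = 0
--     for i in range(len(s)):
--         diff += 1 if s[i] == '0' else -1
--         result = add_mod(result, multiply_mod(diff_to_left_sum.get(diff, 0), len(s) - i))
--
--         diff_to_left_sum[diff] = add_mod(diff_to_left_sum.get(diff, 0), i + 2)
--
--     return result
--
-- def add_mod(x, y):
--     return (x + y) % MODULUS
--
-- def multiply_mod(x, y):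
--     return (x * y) % MODULUS
-- ===== SOURCE B (Python) =====
-- MODULUS = 10**9 + 7
--
-- def solve(s):
--     n = len(s)
--     bals = []
--     diff = 0
--     for ch in s:
--         diff += 1 if ch == '0' else -1
--         bals.append(diff)
--     entries = [(d, (i, i + 2)) for i, d in enumerate(bals)]
--     groups = {0: [(-1, 1)]}
--     for key, item in entries:
--         groups.setdefault(key, []).append(item)
--     result = 0
--     for members in groups.values():
--         left = 0
--         for i, w in members:
--             if i >= 0:
--                 result = (result + left * (n - i)) % MODULUS
--             left = (left + w) % MODULUS
--     return result
-- ===== Notes on version B (the rewrite author's own statement) =====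
-- stated objective: alternative
-- what changed: Replaces the single interleaved pass (running balance-keyed dict of mod-reduced left-weight sums consumed and updated at each character) by a two-phase group-by: first build per-balance lists of (index, left-weight) seeded with the balance-0 sentinel, then accumulate each group's prefix-sum contributions independently.
import Mathlib
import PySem

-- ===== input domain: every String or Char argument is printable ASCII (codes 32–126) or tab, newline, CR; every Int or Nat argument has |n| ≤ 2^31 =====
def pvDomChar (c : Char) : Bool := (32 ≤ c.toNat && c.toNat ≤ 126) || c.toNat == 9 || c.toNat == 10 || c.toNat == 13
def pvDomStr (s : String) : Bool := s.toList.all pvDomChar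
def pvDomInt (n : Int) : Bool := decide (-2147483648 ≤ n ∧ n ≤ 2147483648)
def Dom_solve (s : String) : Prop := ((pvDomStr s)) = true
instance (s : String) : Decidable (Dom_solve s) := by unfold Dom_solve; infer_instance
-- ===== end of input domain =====

-- B replaces A's single interleaved pass over a balance-keyed dict by a two-phase group-by-balance
-- table (per-balance lists of (index, left-weight) with a balance-0 sentinel) followed by an
-- independent per-group prefix-sum accumulation; same O(n) cost, different decomposition.

def pvMod : Int := 1000000007

def addMod (x y : Int) : Int := PySem.Int.mod (x + y) pvMod

def multiplyMod (x y : Int) : Int := PySem.Int.mod (x * y) pvMod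

-- ===== PORT A =====
def solveBody (s : String) (st : PySem.Dict Int Int × Int × Int) (i : Int) :
    PySem.Dict Int Int × Int × Int :=
  let diff := st.2.2 + (if PySem.Str.pyGet? s i = some '0' then 1 else -1)
  let result := addMod st.2.1 (multiplyMod (st.1.getD diff 0) (PySem.Str.len s - i))
  (st.1.insert diff (addMod (st.1.getD diff 0) (i + 2)), result, diff)

def solve (s : String) : Int :=
  ((PySem.List.pyRange 0 (PySem.Str.len s)).foldl (solveBody s)
    (PySem.Dict.ofList [((0 : Int), (1 : Int))], (0 : Int), (0 : Int))).2.1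

-- ===== PORT B =====
def balsBody (p : List Int × Int) (ch : Char) : List Int × Int :=
  let d := p.2 + (if ch = '0' then 1 else -1)
  (p.1 ++ [d], d)

def memberBody (n : Int) (lr : Int × Int) (m : Int × Int) : Int × Int :=
  (PySem.Int.mod (lr.1 + m.2) pvMod,
   if 0 ≤ m.1 then PySem.Int.mod (lr.2 + lr.1 * (n - m.1)) pvMod else lr.2)

def solve_alt (s : String) : Int :=
  let n := PySem.Str.len s
  let bals := (s.toList.foldl balsBody ([], 0)).1
  let entries := (PySem.List.enumerate bals).map (fun p => (p.2, (p.1, p.1 + 2)))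
  let groups := entries.foldl (fun d p => d.modify p.1 [] fun x => x ++ [p.2])
    (PySem.Dict.ofList [((0 : Int), [((-1 : Int), (1 : Int))])])
  groups.values.foldl (fun result members => (members.foldl (memberBody n) (0, result)).2) 0

-- ===== PRECONDITION & SPEC =====
def Spec_solve (s : String) (out : Int) : Prop := out = solve_alt s
instance (s : String) (out : Int) : Decidable (Spec_solve s out) := by unfold Spec_solve; infer_instance

-- ===== CLAIM (what is proved, stated in full; the proofs are below) =====
def Claim_equal_solve : Prop := ∀ (s : String), Dom_solve s → Spec_solve s (solve s)

-- ===== LEMMAS AND PROOFS =====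

theorem pvMod_pos : (0:Int) < pvMod := by norm_num [pvMod]

theorem emod_idem (x : Int) : x % pvMod % pvMod = x % pvMod :=
  Int.emod_emod_of_dvd _ dvd_rfl

theorem addMod_eq (x y : Int) : addMod x y = (x + y) % pvMod := by
  rw [addMod, PySem.Int.mod_eq_emod_of_pos pvMod_pos]

theorem multiplyMod_eq (x y : Int) : multiplyMod x y = (x * y) % pvMod := by
  rw [multiplyMod, PySem.Int.mod_eq_emod_of_pos pvMod_pos]

theorem pymod_eq (x : Int) : PySem.Int.mod x pvMod = x % pvMod :=
  PySem.Int.mod_eq_emod_of_pos pvMod_pos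

theorem add_emod_right' (r x : Int) : (r + x % pvMod) % pvMod = (r + x) % pvMod := by
  rw [Int.add_comm r, Int.emod_add_emod, Int.add_comm]

theorem mul_emod_left' (a b : Int) : (a % pvMod * b) % pvMod = a * b % pvMod := by
  conv_lhs => rw [Int.mul_emod]
  rw [emod_idem, ← Int.mul_emod]

-- per-character balance step
def stepC (c : Char) : Int := if c = '0' then 1 else -1

-- balance after the first k characters
def balP (cs : List Char) (k : Nat) : Int := ((cs.take k).map stepC).sum

-- "position j belongs to balance group d"
def qP (cs : List Char) (d : Int) (j : Nat) : Bool := balP cs (j+1) == d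

def sentP (d : Int) : Int := if d = 0 then 1 else 0

-- sum of left-weights (j+2) of positions j < k in group d
def WP (cs : List Char) (k : Nat) (d : Int) : Int :=
  (((List.range k).filter (qP cs d)).map (fun (x : Nat) => (x:Int)+2)).sum

-- the (mod-reduced) contribution of position j
def CP (cs : List Char) (j : Nat) : Int :=
  ((sentP (balP cs (j+1)) + WP cs j (balP cs (j+1))) * ((cs.length:Int) - (j:Int))) % pvMod

-- total contribution of group d
def SP (cs : List Char) (d : Int) : Int :=
  (((List.range cs.length).filter (qP cs d)).map (CP cs)).sum

theorem balP_succ (cs : List Char) (k : Nat) (h : k < cs.length) :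
    balP cs (k+1) = balP cs k + stepC cs[k] := by
  have h' : k < (cs.map stepC).length := by simpa using h
  unfold balP
  rw [List.map_take, List.map_take, List.sum_take_succ _ _ h', List.getElem_map]

theorem WP_succ (cs : List Char) (k : Nat) (d : Int) :
    WP cs (k+1) d = WP cs k d + (if balP cs (k+1) = d then (k:Int)+2 else 0) := by
  unfold WP
  rw [List.range_succ, List.filter_append]
  by_cases h : balP cs (k+1) = d <;> simp [qP, h]

theorem balP_zero (cs : List Char) : balP cs 0 = 0 := by simp [balP]

theorem balP_cons (c : Char) (t : List Char) (k : Nat) :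
    balP (c :: t) (k+1) = stepC c + balP t k := by
  simp [balP, List.take_succ_cons]

theorem solve_loop (s : String) : ∀ (m k : Nat), k + m = s.toList.length →
    ∀ (dts : PySem.Dict Int Int) (r : Int), r % pvMod = r →
    (∀ d, dts.getD d 0 = (sentP d + WP s.toList k d) % pvMod) →
    ((PySem.List.pyRange (k:Int) (s.toList.length:Int)).foldl (solveBody s)
        (dts, r, balP s.toList k)).2.1
      = (r + ((List.range' k m).map (CP s.toList)).sum) % pvMod := by
  intro m
  induction m with
  | zero =>
    intro k hk dts r hr hinv
    have hkn : k = s.toList.length := by omega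
    rw [PySem.List.pyRange_one_eq_nil (by exact_mod_cast hkn.ge)]
    simp [hr]
  | succ m ih =>
    intro k hk dts r hr hinv
    have hkn : k < s.toList.length := by omega
    have hlt : ((k:Int)) < ((s.toList.length:Int)) := by exact_mod_cast hkn
    rw [PySem.List.pyRange_one_cons hlt, List.foldl_cons]
    have hget : PySem.Str.pyGet? s (k:Int) = some (s.toList[k]) := by
      rw [PySem.Str.pyGet?_natCast, List.getElem?_eq_getElem hkn]
    have hdiff : balP s.toList k + (if PySem.Str.pyGet? s (k:Int) = some '0' then 1 else -1)
        = balP s.toList (k+1) := by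
      rw [hget, balP_succ _ _ hkn]
      unfold stepC
      by_cases h : s.toList[k] = '0' <;> simp [h]
    have hbody : solveBody s (dts, r, balP s.toList k) (k:Int)
        = (dts.insert (balP s.toList (k+1))
              (addMod (dts.getD (balP s.toList (k+1)) 0) ((k:Int) + 2)),
           addMod r (multiplyMod (dts.getD (balP s.toList (k+1)) 0) (PySem.Str.len s - (k:Int))),
           balP s.toList (k+1)) := by
      simp only [solveBody]
      rw [hdiff]
    rw [hbody]
    have hr' : addMod r (multiplyMod (dts.getD (balP s.toList (k+1)) 0) (PySem.Str.len s - (k:Int)))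
        % pvMod
        = addMod r (multiplyMod (dts.getD (balP s.toList (k+1)) 0) (PySem.Str.len s - (k:Int))) := by
      rw [addMod_eq, emod_idem]
    have hinv' : ∀ d,
        (dts.insert (balP s.toList (k+1))
            (addMod (dts.getD (balP s.toList (k+1)) 0) ((k:Int) + 2))).getD d 0
          = (sentP d + WP s.toList (k+1) d) % pvMod := by
      intro d
      rw [PySem.Dict.getD_insert, WP_succ]
      by_cases h : d = balP s.toList (k+1)
      · rw [if_pos h, if_pos h.symm, addMod_eq, hinv, Int.emod_add_emod, h]
        ring_nf
      · rw [if_neg h, if_neg (fun hh => h hh.symm), hinv, add_zero]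
    have hstep := ih (k+1) (by omega) _ _ hr' hinv'
    rw [show ((k:Int)) + 1 = (((k+1:Nat)):Int) by push_cast; ring, hstep]
    have hX : multiplyMod (dts.getD (balP s.toList (k+1)) 0) (PySem.Str.len s - (k:Int))
        = CP s.toList k := by
      rw [multiplyMod_eq, hinv, mul_emod_left', CP, PySem.Str.len_eq]
    rw [addMod_eq, hX, Int.emod_add_emod, List.range'_succ, List.map_cons, List.sum_cons]
    ring_nf

-- bals is the list of prefix balances
theorem bals_eq (cs : List Char) : ∀ (acc : List Int) (d0 : Int),
    (cs.foldl balsBody (acc, d0)).1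
      = acc ++ (List.range cs.length).map (fun k => d0 + balP cs (k+1)) := by
  induction cs with
  | nil => intro acc d0; simp
  | cons c t ih =>
    intro acc d0
    simp only [List.foldl_cons]
    have hb : balsBody (acc, d0) c = (acc ++ [d0 + stepC c], d0 + stepC c) := by
      simp [balsBody, stepC]
    rw [hb, ih _ _, List.length_cons, List.range_succ_eq_map]
    simp only [List.map_cons, List.map_map, List.append_assoc, List.singleton_append]
    congr 1
    congr 1
    · rw [balP_cons, balP_zero]; ring
    apply List.map_congr_left
    intro k _
    simp only [Function.comp_apply, Nat.succ_eq_add_one]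
    rw [balP_cons]
    ring

-- the entries list, in closed form
theorem entries_eq (cs : List Char) :
    (PySem.List.enumerate ((cs.foldl balsBody ([], 0)).1)).map
        (fun p => (p.2, (p.1, p.1 + 2)))
      = (List.range cs.length).map
          (fun j => (balP cs (j+1), ((j:Int), (j:Int)+2))) := by
  rw [bals_eq cs [] 0]
  simp only [List.nil_append, zero_add]
  apply List.ext_getElem
  · simp [PySem.List.length_enumerate]
  · intro k h1 h2
    simp [PySem.List.getElem_enumerate]

-- unique split of a filtered range at an element
theorem append_cons_inj {α : Type} {a : α} :
    ∀ (p₁ p₂ s₁ s₂ : List α), p₁ ++ a :: s₁ = p₂ ++ a :: s₂ → a ∉ p₁ → a ∉ p₂ → p₁ = p₂ := by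
  intro p₁
  induction p₁ with
  | nil =>
    intro p₂ s₁ s₂ h h1 h2
    cases p₂ with
    | nil => rfl
    | cons y t₂ =>
      simp only [List.nil_append, List.cons_append, List.cons.injEq] at h
      exact absurd (h.1 ▸ List.mem_cons_self) h2
  | cons x t ih =>
    intro p₂ s₁ s₂ h h1 h2
    cases p₂ with
    | nil =>
      simp only [List.nil_append, List.cons_append, List.cons.injEq] at h
      exact absurd (h.1 ▸ List.mem_cons_self) h1
    | cons y t₂ =>
      simp only [List.cons_append, List.cons.injEq] at h
      have := ih t₂ s₁ s₂ h.2 (fun hm => h1 (List.mem_cons_of_mem _ hm))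
        (fun hm => h2 (List.mem_cons_of_mem _ hm))
      rw [h.1, this]

theorem filter_range_split (n j : Nat) (q : Nat → Bool) (pre post : List Nat)
    (h : (List.range n).filter q = pre ++ j :: post) :
    pre = (List.range j).filter q := by
  have hjmem : j ∈ (List.range n).filter q := by
    rw [h]; exact List.mem_append_right _ List.mem_cons_self
  have hq : q j = true := (List.mem_filter.mp hjmem).2
  have hjn : j < n := List.mem_range.mp (List.mem_filter.mp hjmem).1
  have hsum : j + (n - j) = n := by omega
  have hsplit : List.range n = List.range j ++ List.range' j (n - j) := by
    have h' := @List.range'_append 0 j (n - j) 1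
    simp only [Nat.one_mul, Nat.zero_add] at h'
    rw [← List.range_eq_range', hsum] at h'
    rw [List.range_eq_range']
    exact h'.symm
  have hnj : n - j = (n - j - 1) + 1 := by omega
  have h2 : (List.range n).filter q
      = (List.range j).filter q ++ j :: (List.range' (j+1) (n - j - 1)).filter q := by
    rw [hsplit, List.filter_append, hnj, List.range'_succ, List.filter_cons_of_pos hq]
    simp
  have hnd : ((List.range n).filter q).Nodup := List.nodup_range.filter q
  have hjpre : j ∉ pre := by
    intro hmem
    rw [h] at hnd
    rcases List.nodup_append.mp hnd with ⟨-, -, hdisj⟩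
    exact hdisj j hmem j List.mem_cons_self rfl
  have hjfil : j ∉ (List.range j).filter q := by
    intro hmem
    exact absurd (List.mem_range.mp (List.mem_filter.mp hmem).1) (lt_irrefl j)
  exact append_cons_inj pre ((List.range j).filter q) post
    ((List.range' (j+1) (n - j - 1)).filter q) (h ▸ h2) hjpre hjfil

-- the inner per-group loop on the real members
theorem inner_main (cs : List Char) (s : String) (hs : s.toList = cs) :
    ∀ (js : List Nat) (a L r : Int), r % pvMod = r → L = a % pvMod →
    (∀ pre j post, js = pre ++ j :: post →
        a + (pre.map (fun (x : Nat) => (x:Int)+2)).sum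
          = sentP (balP cs (j+1)) + WP cs j (balP cs (j+1))) →
    ((js.map (fun (x : Nat) => ((x:Int), (x:Int)+2))).foldl (memberBody (PySem.Str.len s)) (L, r)).2
      = (r + (js.map (CP cs)).sum) % pvMod := by
  intro js
  induction js with
  | nil =>
    intro a L r hr hL H
    simpa using hr.symm
  | cons j tjs ih =>
    intro a L r hr hL H
    have ha : a = sentP (balP cs (j+1)) + WP cs j (balP cs (j+1)) := by
      have := H [] j tjs rfl
      simpa using this
    have hstep : memberBody (PySem.Str.len s) (L, r) ((j:Int), (j:Int)+2)
        = ((L + ((j:Int)+2)) % pvMod, (r + L * (PySem.Str.len s - (j:Int))) % pvMod) := by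
      simp [memberBody, pymod_eq]
    have hn : PySem.Str.len s = ((cs.length:Int)) := by rw [PySem.Str.len_eq, hs]
    have hrr : (r + L * (PySem.Str.len s - (j:Int))) % pvMod = (r + CP cs j) % pvMod := by
      rw [hn, hL, ← add_emod_right' r (a % pvMod * ((cs.length:Int) - (j:Int))),
        mul_emod_left', add_emod_right', ← add_emod_right' r, CP, ← ha]
    have hLL : (L + ((j:Int)+2)) % pvMod = (a + ((j:Int)+2)) % pvMod := by
      rw [hL, Int.emod_add_emod]
    have H' : ∀ pre j' post, tjs = pre ++ j' :: post →
        (a + ((j:Int)+2)) + (pre.map (fun (x : Nat) => (x:Int)+2)).sum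
          = sentP (balP cs (j'+1)) + WP cs j' (balP cs (j'+1)) := by
      intro pre j' post hsplit
      have := H (j :: pre) j' post (by rw [hsplit]; rfl)
      simp only [List.map_cons, List.sum_cons] at this
      rw [← this]
      ring
    have := ih (a + ((j:Int)+2)) ((a + ((j:Int)+2)) % pvMod) ((r + CP cs j) % pvMod)
      (emod_idem _) rfl H'
    simp only [List.map_cons, List.foldl_cons, List.sum_cons]
    rw [hstep, hrr, hLL, this, Int.emod_add_emod, add_assoc]

-- the inner loop over one full group list
theorem inner_group (cs : List Char) (s : String) (hs : s.toList = cs) (d : Int) (r : Int)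
    (hr : r % pvMod = r) :
    (((if d = 0 then [((-1:Int),(1:Int))] else []) ++
        (((List.range cs.length).filter (qP cs d)).map (fun (x : Nat) => ((x:Int), (x:Int)+2)))).foldl
        (memberBody (PySem.Str.len s)) (0, r)).2
      = (r + SP cs d) % pvMod := by
  have hmain := inner_main cs s hs ((List.range cs.length).filter (qP cs d)) (sentP d)
    (sentP d % pvMod) r hr rfl ?_
  · rw [List.foldl_append]
    have hsent : (((if d = 0 then [((-1:Int),(1:Int))] else []) : List (Int × Int)).foldl
        (memberBody (PySem.Str.len s)) (0, r)) = (sentP d % pvMod, r) := by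
      by_cases h : d = 0
      · simp [h, memberBody, pymod_eq, sentP]
      · simp [h, sentP]
      
    rw [hsent, hmain]
    unfold SP
    rfl
  · intro pre j post hsplit
    have hjmem : j ∈ (List.range cs.length).filter (qP cs d) := by
      rw [hsplit]; exact List.mem_append_right _ List.mem_cons_self
    have hbal : balP cs (j+1) = d := by
      have := (List.mem_filter.mp hjmem).2
      unfold qP at this
      exact beq_iff_eq.mp this
    have hpre : pre = (List.range j).filter (qP cs d) :=
      filter_range_split cs.length j (qP cs d) pre post hsplit
    rw [hbal, hpre]
    unfold WP
    rfl

theorem outer_loop (cs : List Char) (s : String) (hs : s.toList = cs) :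
    ∀ (K : List Int) (r : Int), r % pvMod = r →
    K.foldl (fun result d =>
        ((((if d = 0 then [((-1:Int),(1:Int))] else []) ++
            (((List.range cs.length).filter (qP cs d)).map
              (fun (x : Nat) => ((x:Int), (x:Int)+2)))).foldl
          (memberBody (PySem.Str.len s)) (0, result)).2)) r
      = (r + (K.map (SP cs)).sum) % pvMod := by
  intro K
  induction K with
  | nil => intro r hr; simpa using hr.symm
  | cons d K ih =>
    intro r hr
    rw [List.foldl_cons]
    show K.foldl _ ((((if d = 0 then [((-1:Int),(1:Int))] else []) ++
            (((List.range cs.length).filter (qP cs d)).map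
              (fun (x : Nat) => ((x:Int), (x:Int)+2)))).foldl
          (memberBody (PySem.Str.len s)) (0, r)).2) = _
    rw [inner_group cs s hs d r hr, ih _ (emod_idem _), Int.emod_add_emod,
      List.map_cons, List.sum_cons, add_assoc]

theorem regroup (cs : List Char) (K : List Int) (hnd : K.Nodup)
    (hcov : ∀ j : Nat, j < cs.length → balP cs (j+1) ∈ K) :
    (K.map (SP cs)).sum = ((List.range cs.length).map (CP cs)).sum := by
  rw [← List.sum_toFinset _ hnd]
  have h1 : ∀ d, SP cs d
      = ∑ j ∈ (Finset.range cs.length).filter (fun j => balP cs (j+1) = d), CP cs j := by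
    intro d
    rw [SP, ← List.sum_toFinset _ (List.nodup_range.filter _), List.toFinset_filter,
      List.toFinset_range]
    apply Finset.sum_congr
    · apply Finset.filter_congr
      intro j _
      simp [qP]
    · intros; rfl
  calc K.toFinset.sum (SP cs)
      = ∑ d ∈ K.toFinset,
          ∑ j ∈ (Finset.range cs.length).filter (fun j => balP cs (j+1) = d), CP cs j :=
        Finset.sum_congr rfl (fun d _ => h1 d)
    _ = ∑ j ∈ Finset.range cs.length, CP cs j :=
        Finset.sum_fiberwise_of_maps_to
          (fun j hj => List.mem_toFinset.mpr (hcov j (Finset.mem_range.mp hj))) _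
    _ = ((List.range cs.length).map (CP cs)).sum := by
        rw [← List.toFinset_range, List.sum_toFinset _ List.nodup_range]

theorem solve_eq (s : String) :
    solve s = ((List.range s.toList.length).map (CP s.toList)).sum % pvMod := by
  have hinv0 : ∀ d, (PySem.Dict.ofList [((0:Int),(1:Int))]).getD d 0
      = (sentP d + WP s.toList 0 d) % pvMod := by
    intro d
    have hW : WP s.toList 0 d = 0 := by simp [WP]
    rw [hW, add_zero]
    by_cases h : d = 0
    · subst h
      norm_num [sentP, pvMod]
      decide
    · simp [PySem.Dict.ofList, PySem.Dict.update, PySem.Dict.getD_insert,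
        PySem.Dict.getD_empty, h, sentP]
  have h := solve_loop s s.toList.length 0 (by omega) _ 0 (Int.zero_emod _) hinv0
  rw [balP_zero] at h
  simp only [Nat.cast_zero, zero_add] at h
  rw [← List.range_eq_range'] at h
  unfold solve
  rw [PySem.Str.len_eq]
  exact h

theorem solve_alt_eq (s : String) :
    solve_alt s = ((List.range s.toList.length).map (CP s.toList)).sum % pvMod := by
  simp only [solve_alt]
  rw [entries_eq s.toList]
  set E := (List.range s.toList.length).map
    (fun j => (balP s.toList (j+1), ((j:Int), (j:Int)+2))) with hE
  set G := E.foldl (fun d p => d.modify p.1 [] fun x => x ++ [p.2])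
    (PySem.Dict.ofList [((0:Int), [((-1:Int),(1:Int))])]) with hG
  have hk0 : (PySem.Dict.ofList [((0:Int), [((-1:Int),(1:Int))])]).keys = [(0:Int)] := by decide
  have hknd : G.keys.Nodup := by
    rw [hG]
    exact PySem.Dict.nodup_keys_foldl_modify_key E (fun p => p.1) []
      (fun _ p x => x ++ [p.2]) _ (by rw [hk0]; simp)
  have hkeys : G.keys = PySem.Set.update [(0:Int)] (E.map (fun p => p.1)) := by
    rw [hG, ← hk0]
    exact PySem.Dict.keys_foldl_modify_key E (fun p => p.1) [] (fun _ p x => x ++ [p.2]) _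
  have hgetD : ∀ d, G.getD d []
      = (if d = 0 then [((-1:Int),(1:Int))] else []) ++
          (((List.range s.toList.length).filter (qP s.toList d)).map
            (fun (x : Nat) => ((x:Int), (x:Int)+2))) := by
    intro d
    rw [hG, PySem.Dict.getD_foldl_modify_append]
    congr 1
    · by_cases h : d = 0
      · subst h
        rw [if_pos rfl]
        decide
      · rw [if_neg h]
        simp [PySem.Dict.ofList, PySem.Dict.update, PySem.Dict.getD_insert,
          PySem.Dict.getD_empty, h]
    · rw [hE, List.filter_map, List.map_map]
      have hf : ((fun (p : Int × (Int × Int)) => p.1 == d) ∘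
          (fun j => (balP s.toList (j+1), ((j:Int), (j:Int)+2)))) = qP s.toList d := by
        funext j
        simp [Function.comp, qP]
      rw [hf]
      apply List.map_congr_left
      intro x _
      simp
  have hvals : G.values = G.keys.map (fun k => G.getD k []) := by
    simp only [PySem.Dict.values]
    rw [PySem.Dict.items_eq_map_keys G hknd [], List.map_map]
    apply List.map_congr_left
    intro k _
    simp
  rw [hvals, List.foldl_map]
  have hfun : (fun (x : Int) (y : Int) =>
        (((G.getD y []).foldl (memberBody (PySem.Str.len s)) (0, x)).2))
      = (fun result d =>
        ((((if d = 0 then [((-1:Int),(1:Int))] else []) ++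
            (((List.range s.toList.length).filter (qP s.toList d)).map
              (fun (x : Nat) => ((x:Int), (x:Int)+2)))).foldl
          (memberBody (PySem.Str.len s)) (0, result)).2)) := by
    funext x y
    rw [hgetD y]
  rw [hfun, outer_loop s.toList s rfl G.keys 0 (Int.zero_emod _), zero_add]
  congr 1
  apply regroup s.toList G.keys hknd
  intro j hj
  rw [hkeys]
  apply (PySem.Set.mem_update _ _ _).mpr
  right
  rw [hE, List.map_map]
  exact List.mem_map.mpr ⟨j, List.mem_range.mpr hj, rfl⟩

-- ===== VERDICT (by name: the statement is the Claim_ definition above) =====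
theorem solve_spec : Claim_equal_solve := by
  intro s _
  unfold Spec_solve
  rw [solve_eq, solve_alt_eq]
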